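-- pv_equiv track=rewrite | github.com/devonhollowood/adventofcode | 2018/day02.py | part2
-- ===== SOURCE A (Python) =====
-- import itertools
--
-- def part2(puzzle):
--     for (box1, box2) in itertools.combinations(puzzle, 2):
--         common = ''
--         diffs = 0
--         for (a, b) in zip(box1, box2):
--             if a == b:
--                 common += a
--             else:
--                 diffs += 1
--             if diffs > 1:
--                 break
--         else:  # successfully completed for loop, we have a match
--             return common
--     return None
-- ===== SOURCE B (Python) =====
-- def part2(puzzle):
--     # For each pair (in the same first-by-index order), decide the "at most one
--     # mismatch over the zipped prefix" test by a common-prefix / suffix-equality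
--     # decomposition on slices instead of a per-character counting loop.
--     for i, x in enumerate(puzzle):
--         for y in puzzle[i + 1:]:
--             m = min(len(x), len(y))
--             a = x[:m]
--             b = y[:m]
--             if a == b:
--                 return a
--             p = 0
--             while a[p] == b[p]:
--                 p += 1
--             if a[p + 1:] == b[p + 1:]:
--                 return a[:p] + a[p + 1:]
--     return None
-- ===== Notes on version B (the rewrite author's own statement) =====
-- stated objective: alternative
-- what changed: The per-character loop that accumulates common chars and counts mismatches is replaced by a common-prefix/suffix-equality decomposition on slices (equal prefixes, first divergence point, one suffix comparison), with the pair iteration rewritten as enumerate over suffix slices instead of itertools.combinations.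
import Mathlib
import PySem

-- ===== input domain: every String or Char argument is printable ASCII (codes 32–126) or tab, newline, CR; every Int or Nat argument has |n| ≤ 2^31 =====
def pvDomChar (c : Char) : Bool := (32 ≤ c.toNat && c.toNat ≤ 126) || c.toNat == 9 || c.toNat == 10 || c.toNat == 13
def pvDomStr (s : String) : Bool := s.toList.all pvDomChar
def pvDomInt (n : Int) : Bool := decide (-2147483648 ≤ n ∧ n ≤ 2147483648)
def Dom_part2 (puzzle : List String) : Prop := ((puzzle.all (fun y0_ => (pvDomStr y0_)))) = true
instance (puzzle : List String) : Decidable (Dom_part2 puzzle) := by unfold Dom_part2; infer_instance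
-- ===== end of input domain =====

-- B replaces A's per-character counting loop by a common-prefix / suffix-equality
-- decomposition on slices (objective: alternative, same asymptotic cost).

-- ===== PORT A =====
-- A's inner for-loop over zip(box1, box2) with the (common, diffs) state and the
-- `break`/`else` : returns `some common` when the loop completes, `none` on break.
-- Python's string concatenation `common += a` is ported over List Char (exact).
def pvInnerA : List (Char × Char) → List Char → Int → Option (List Char)
  | [], common, _diffs => some common
  | (a, b) :: rest, common, diffs =>
    let common' := if a == b then common ++ [a] else common
    let diffs' := if a == b then diffs else diffs + 1
    if diffs' > 1 then none else pvInnerA rest common' diffs'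

-- itertools.combinations(puzzle, 2) with the early return: scan box1 against the
-- remaining boxes, then continue with the tail.
def pvScanA (box1 : List Char) : List String → Option String
  | [] => none
  | box2 :: rest =>
    match pvInnerA (box1.zip box2.toList) [] 0 with
    | some common => some (String.mk common)
    | none => pvScanA box1 rest

def part2 : List String → Option String
  | [] => none
  | box1 :: rest =>
    match pvScanA box1.toList rest with
    | some r => some r
    | none => part2 rest

-- ===== PORT B =====
-- B's `while a[p] == b[p]: p += 1` (first divergence point of two unequal
-- equal-length slices).
def pvFindP : List Char → List Char → Nat
  | a :: as, b :: bs => if a == b then pvFindP as bs + 1 else 0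
  | _, _ => 0

-- B's inner body: truncate to the common length, then prefix/suffix slice tests.
def pvMatchB (x y : List Char) : Option (List Char) :=
  let m := min x.length y.length
  let a := x.take m
  let b := y.take m
  if a == b then some a
  else
    let p := pvFindP a b
    if a.drop (p + 1) == b.drop (p + 1) then some (a.take p ++ a.drop (p + 1)) else none

-- B's `for y in puzzle[i+1:]` inner loop.
def pvScanB (x : List Char) : List String → Option String
  | [] => none
  | y :: rest =>
    match pvMatchB x y.toList with
    | some r => some (String.mk r)
    | none => pvScanB x rest

def part2_alt : List String → Option String
  | [] => none
  | x :: rest =>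
    match pvScanB x.toList rest with
    | some r => some r
    | none => part2_alt rest

-- ===== PRECONDITION & SPEC =====
def Spec_part2 (puzzle : List String) (out : Option String) : Prop := out = part2_alt puzzle
instance (puzzle : List String) (out : Option String) : Decidable (Spec_part2 puzzle out) := by unfold Spec_part2; infer_instance

-- ===== CLAIM (what is proved, stated in full; the proofs are below) =====
def Claim_equal_part2 : Prop := ∀ (puzzle : List String), Dom_part2 puzzle → Spec_part2 puzzle (part2 puzzle)

-- ===== LEMMAS AND PROOFS =====

-- A's inner loop once one mismatch has been seen: succeeds iff the rest is equal.
lemma innerA_one (l : List (Char × Char)) (c : List Char) :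
    pvInnerA l c 1 =
      if l.map Prod.fst = l.map Prod.snd then some (c ++ l.map Prod.fst) else none := by
  induction l generalizing c with
  | nil => simp [pvInnerA]
  | cons hd tl ih =>
    obtain ⟨a, b⟩ := hd
    by_cases hab : a = b
    · subst hab
      have hstep : pvInnerA ((a, a) :: tl) c 1 = pvInnerA tl (c ++ [a]) 1 := by
        simp [pvInnerA]
      rw [hstep, ih (c ++ [a])]
      by_cases h : tl.map Prod.fst = tl.map Prod.snd
      · simp [h]
      · simp [h]
    · have hstep : pvInnerA ((a, b) :: tl) c 1 = none := by
        simp [pvInnerA, hab]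
      rw [hstep]
      have : ¬ ((a, b) :: tl).map Prod.fst = ((a, b) :: tl).map Prod.snd := by
        simp [List.cons.injEq]
        intro h; exact absurd h hab
      rw [if_neg this]

-- A's inner loop from diffs = 0, on equal-length lists, equals B's decomposition.
lemma innerA_eq_matchB_core (a b : List Char) (hlen : a.length = b.length) (c : List Char) :
    pvInnerA (a.zip b) c 0 =
      (if a = b then some (c ++ a)
       else
         let p := pvFindP a b
         if a.drop (p + 1) = b.drop (p + 1) then some (c ++ (a.take p ++ a.drop (p + 1)))
         else none) := by
  induction a generalizing b c with
  | nil =>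
    cases b with
    | nil => simp [pvInnerA]
    | cons y bs => simp at hlen
  | cons x as ih =>
    cases b with
    | nil => simp at hlen
    | cons y bs =>
      simp at hlen
      by_cases hxy : x = y
      · subst hxy
        rw [List.zip_cons_cons]
        have hstep : pvInnerA ((x, x) :: as.zip bs) c 0 = pvInnerA (as.zip bs) (c ++ [x]) 0 := by
          simp [pvInnerA]
        rw [hstep, ih bs hlen (c ++ [x])]
        by_cases h : as = bs
        · simp [h]
        · have hne : ¬ (x :: as = x :: bs) := by simp [h]
          simp only [h, hne, if_false]
          simp only [pvFindP, beq_self_eq_true, if_true]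
          simp [List.take_succ_cons, List.drop_succ_cons]
      · rw [List.zip_cons_cons]
        have hstep : pvInnerA ((x, y) :: as.zip bs) c 0 = pvInnerA (as.zip bs) c 1 := by
          simp [pvInnerA, hxy]
        have hz : (as.zip bs).map Prod.fst = as :=
          List.map_fst_zip (le_of_eq hlen)
        have hz2 : (as.zip bs).map Prod.snd = bs :=
          List.map_snd_zip (le_of_eq hlen.symm)
        rw [hstep, innerA_one, hz, hz2]
        have hne : ¬ (x :: as = y :: bs) := by simp; intro h; exact absurd h hxy
        have hp : pvFindP (x :: as) (y :: bs) = 0 := by simp [pvFindP, hxy]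
        simp only [hne, if_false, hp]
        by_cases h : as = bs <;> simp [h]

-- zip truncates to the shorter list: zip a b = zip (take m a) (take m b).
lemma zip_take_min (a b : List Char) :
    a.zip b = (a.take (min a.length b.length)).zip (b.take (min a.length b.length)) := by
  induction a generalizing b with
  | nil => simp
  | cons x as ih =>
    cases b with
    | nil => simp
    | cons y bs =>
      simp only [List.length_cons, Nat.succ_min_succ, List.take_succ_cons,
        List.zip_cons_cons, List.cons.injEq, true_and]
      exact ih bs

lemma innerA_eq_matchB (x y : List Char) :
    pvInnerA (x.zip y) [] 0 = pvMatchB x y := by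
  rw [zip_take_min]
  rw [innerA_eq_matchB_core _ _ (by simp)]
  simp [pvMatchB]

lemma scanA_eq_scanB (x : List Char) (l : List String) :
    pvScanA x l = pvScanB x l := by
  induction l with
  | nil => rfl
  | cons y rest ih =>
    simp [pvScanA, pvScanB, innerA_eq_matchB, ih]

lemma part2_eq_alt (puzzle : List String) : part2 puzzle = part2_alt puzzle := by
  induction puzzle with
  | nil => rfl
  | cons x rest ih =>
    simp [part2, part2_alt, scanA_eq_scanB, ih]

-- ===== VERDICT (by name: the statement is the Claim_ definition above) =====
theorem part2_spec : Claim_equal_part2 := by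
  intro puzzle _dom
  unfold Spec_part2
  exact part2_eq_alt puzzle
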